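-- pv_equiv track=rewrite | github.com/atztogo/cogue | cogue/crystal/utility.py | get_Z
-- ===== SOURCE A (Python) =====
-- def get_Z(numbers):
--     count = {}
--     for n in numbers:
--         if n in count:
--             count[n] += 1
--         else:
--             count[n] = 1
--     values  = list(count.values())
--
--     try:
--         from math import gcd
--     except ImportError:
--         from fractions import gcd
--
--     x = values[0]
--     for v in values[1:]:
--         x = gcd(x, v)
--
--     return x
-- ===== SOURCE B (Python) =====
-- def get_Z(numbers):
--     from itertools import groupby
--     from functools import reduce
--     try:
--         from math import gcd
--     except ImportError:
--         from fractions import gcd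
--     values = [sum(1 for _ in g) for _, g in groupby(sorted(numbers))]
--     return reduce(gcd, values[1:], values[0])
-- ===== Notes on version B (the rewrite author's own statement) =====
-- stated objective: alternative
-- what changed: Multiplicities are obtained by sorting a copy and taking run lengths of consecutive groups (itertools.groupby) instead of building a frequency dict, then gcd is folded over them with functools.reduce.
import Mathlib
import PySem

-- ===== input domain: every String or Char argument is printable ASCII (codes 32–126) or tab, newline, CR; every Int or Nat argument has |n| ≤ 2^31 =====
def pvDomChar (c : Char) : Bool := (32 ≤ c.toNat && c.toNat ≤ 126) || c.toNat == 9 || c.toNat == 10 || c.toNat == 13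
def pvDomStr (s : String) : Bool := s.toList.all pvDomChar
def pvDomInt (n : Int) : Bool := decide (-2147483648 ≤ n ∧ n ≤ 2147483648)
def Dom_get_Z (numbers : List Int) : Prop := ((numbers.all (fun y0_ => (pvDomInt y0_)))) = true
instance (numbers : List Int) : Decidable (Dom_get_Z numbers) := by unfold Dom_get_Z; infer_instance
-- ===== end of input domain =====

-- B obtains the multiplicities as run lengths of consecutive groups of the sorted list (groupby) instead of a frequency dict, then folds gcd: a different algorithm, not faster.


-- ===== PORT A =====
def get_Z (numbers : List Int) : Int :=
  let count := numbers.foldl (fun d n =>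
      if d.contains n then d.insert n (d.getD n 0 + 1) else d.insert n 1)
    (PySem.Dict.empty : PySem.Dict Int Int)
  let values := count.values
  match PySem.List.pyGet? values 0 with
  | none => 0   -- values[0] raises IndexError in Python; excluded by Pre_get_Z
  | some x0 => (PySem.List.slice values (some 1)).foldl (fun x v => (Int.gcd x v : Int)) x0

-- ===== PORT B =====
-- run lengths of consecutive equal groups (itertools.groupby on the sorted copy)
def runLengths : List Int → List Int
  | [] => []
  | x :: t =>
    ((1 : Int) + (t.takeWhile (· == x)).length) :: runLengths (t.dropWhile (· == x))
termination_by s => s.length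
decreasing_by
  exact Nat.lt_succ_of_le (t.dropWhile_sublist (p := (· == x))).length_le

def get_Z_alt (numbers : List Int) : Int :=
  let values := runLengths (PySem.List.sorted numbers (fun x => x) false)
  match values with
  | [] => 0   -- values[0] raises IndexError in Python; excluded by Pre_get_Z
  | v :: rest => rest.foldl (fun x y => (Int.gcd x y : Int)) v

-- ===== PRECONDITION & SPEC =====
-- Both A and B raise IndexError on the empty list (values[0] of an empty values list): excluded.
def Pre_get_Z (numbers : List Int) : Prop := numbers ≠ []
instance (numbers : List Int) : Decidable (Pre_get_Z numbers) := by unfold Pre_get_Z; infer_instance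
def pvWitness_get_Z : List Int := [2, 2, 4, 4, 4, 4]

def Spec_get_Z (numbers : List Int) (out : Int) : Prop := out = get_Z_alt numbers
instance (numbers : List Int) (out : Int) : Decidable (Spec_get_Z numbers out) := by unfold Spec_get_Z; infer_instance

-- ===== CLAIM (what is proved, stated in full; the proofs are below) =====
def Claim_equal_get_Z : Prop := ∀ (numbers : List Int), Dom_get_Z numbers → Pre_get_Z numbers → Spec_get_Z numbers (get_Z numbers)

-- ===== LEMMAS AND PROOFS =====

-- the gcd step both ports fold with
def gstep (x v : Int) : Int := (Int.gcd x v : Int)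

theorem gstep_rightComm (b x y : Int) : gstep (gstep b x) y = gstep (gstep b y) x := by
  simp [gstep, Int.gcd, Int.natAbs_natCast, Nat.gcd_assoc, Nat.gcd_comm x.natAbs]

theorem foldl_gstep_perm {l₁ l₂ : List Int} (h : l₁.Perm l₂) (b : Int) :
    l₁.foldl gstep b = l₂.foldl gstep b :=
  @List.Perm.foldl_eq _ _ gstep _ _ ⟨gstep_rightComm⟩ h b

theorem gstep_zero {v : Int} (h : 0 ≤ v) : gstep 0 v = v := by
  simp [gstep, Int.gcd]; omega

-- A's loop body equals the PySem counter loop body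
theorem loopA_eq (d : PySem.Dict Int Int) (n : Int) :
    (if d.contains n then d.insert n (d.getD n 0 + 1) else d.insert n 1)
      = d.insert n (d.getD n 0 + 1) := by
  by_cases h : d.contains n = true
  · simp [h]
  · have h' : d.get? n = none := (PySem.Dict.get?_eq_none_iff_contains d n).2 (by simpa using h)
    simp [h, PySem.Dict.getD, h']

-- A's values list
theorem valuesA_eq (xs : List Int) :
    (xs.foldl (fun d n =>
        if d.contains n then d.insert n (d.getD n 0 + 1) else d.insert n 1)
      (PySem.Dict.empty : PySem.Dict Int Int)).values
      = (PySem.Set.ofList xs).map (fun k => (xs.count k : Int)) := by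
  have h1 : xs.foldl (fun d n =>
        if d.contains n then d.insert n (d.getD n 0 + 1) else d.insert n 1)
      (PySem.Dict.empty : PySem.Dict Int Int)
      = xs.foldl (fun d n => d.insert n (d.getD n 0 + 1)) PySem.Dict.empty := by
    have hf : (fun (d : PySem.Dict Int Int) (n : Int) =>
        if d.contains n then d.insert n (d.getD n 0 + 1) else d.insert n 1)
        = fun d n => d.insert n (d.getD n 0 + 1) := by
      funext d n; exact loopA_eq d n
    rw [hf]
  rw [h1, PySem.Dict.foldl_insert_getD_add_one_eq_counter]
  simp only [PySem.Dict.values, PySem.Dict.items_counter, List.map_map]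
  rfl

-- B's run lengths on a grouped (sorted) list: counts over a Nodup key list with the members of s
theorem not_mem_dropWhile_sorted (x : Int) (t : List Int)
    (ht : ∀ y ∈ t, x ≤ y) (hp : t.Pairwise (· ≤ ·)) : x ∉ t.dropWhile (· == x) := by
  induction t with
  | nil => simp
  | cons y t' ih =>
    by_cases hy : y = x
    · subst hy
      rw [List.dropWhile_cons_of_pos (by simp)]
      exact ih (fun z hz => ht z (List.mem_cons_of_mem _ hz)) hp.tail
    · rw [List.dropWhile_cons_of_neg (by simp [hy])]
      intro hmem
      rcases List.mem_cons.1 hmem with h | h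
      · exact hy h.symm
      · have h1 : y ≤ x := (List.pairwise_cons.1 hp).1 x h
        have h2 : x ≤ y := ht y (List.mem_cons_self)
        exact hy (le_antisymm h1 h2)

theorem runLengths_grouped (s : List Int) (hs : s.Pairwise (· ≤ ·)) :
    ∃ keys : List Int, runLengths s = keys.map (fun k => (s.count k : Int))
      ∧ keys.Nodup ∧ (∀ k, k ∈ keys ↔ k ∈ s) := by
  induction s using runLengths.induct with
  | case1 => exact ⟨[], by simp [runLengths], by simp, by simp⟩
  | case2 x t ih =>
    have hxt : ∀ y ∈ t, x ≤ y := fun y hy => (List.pairwise_cons.1 hs).1 y hy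
    have hxd : x ∉ t.dropWhile (· == x) := not_mem_dropWhile_sorted x t hxt hs.tail
    have hd_sorted : (t.dropWhile (· == x)).Pairwise (· ≤ ·) :=
      List.Pairwise.sublist (t.dropWhile_sublist (p := (· == x))) hs.tail
    obtain ⟨keys, hmap, hnd, hmem⟩ := ih hd_sorted
    have hr : ∀ y ∈ t.takeWhile (· == x), y = x := by
      intro y hy
      simpa using List.mem_takeWhile_imp hy
    have ht : t = t.takeWhile (· == x) ++ t.dropWhile (· == x) :=
      (List.takeWhile_append_dropWhile (p := (· == x)) (l := t)).symm
    refine ⟨x :: keys, ?_, ?_, ?_⟩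
    · rw [runLengths]
      have hcx : (x :: t).count x = 1 + (t.takeWhile (· == x)).length := by
        rw [List.count_cons_self]
        conv_lhs => rw [ht]
        rw [List.count_append]
        have h1 : (t.takeWhile (· == x)).count x = (t.takeWhile (· == x)).length :=
          List.count_eq_length.2 (fun y hy => by simp [hr y hy])
        have h2 : (t.dropWhile (· == x)).count x = 0 := List.count_eq_zero.2 hxd
        omega
      simp only [List.map_cons, hcx]
      refine List.cons_eq_cons.mpr ⟨?_, ?_⟩
      · push_cast; ring
      · rw [hmap]
        apply List.map_congr_left
        intro k hk
        have hkd : k ∈ t.dropWhile (· == x) := (hmem k).1 hk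
        have hkx : k ≠ x := fun h => hxd (h ▸ hkd)
        congr 1
        rw [List.count_cons_of_ne hkx.symm]
        conv_rhs => rw [ht]
        rw [List.count_append]
        have h1 : (t.takeWhile (· == x)).count k = 0 :=
          List.count_eq_zero.2 (fun h => hkx (hr k h))
        omega
    · exact List.nodup_cons.2 ⟨fun h => hxd ((hmem x).1 h), hnd⟩
    · intro k
      simp only [List.mem_cons, hmem]
      constructor
      · rintro (rfl | h)
        · exact .inl rfl
        · exact .inr (by rw [ht]; exact List.mem_append_right _ h)
      · rintro (rfl | h)
        · exact .inl rfl
        · rw [ht] at h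
          rcases List.mem_append.1 h with h | h
          · exact .inl (hr k h)
          · exact .inr h

theorem values_perm (xs : List Int) :
    (runLengths (PySem.List.sorted xs (fun x => x) false)).Perm
      ((PySem.Set.ofList xs).map (fun k => (xs.count k : Int))) := by
  obtain ⟨keys, hmap, hnd, hmem⟩ :=
    runLengths_grouped (PySem.List.sorted xs (fun x => x) false)
      (PySem.List.sorted_pairwise xs (fun x => x))
  have hperm : (PySem.List.sorted xs (fun x => x) false).Perm xs :=
    PySem.List.sorted_perm xs (fun x => x) false
  have hcnt : ∀ k : Int, (PySem.List.sorted xs (fun x => x) false).count k = xs.count k :=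
    fun k => hperm.count_eq k
  have hmap' : runLengths (PySem.List.sorted xs (fun x => x) false)
      = keys.map (fun k => (xs.count k : Int)) := by
    rw [hmap]; exact List.map_congr_left (fun k _ => by rw [hcnt])
  rw [hmap']
  apply List.Perm.map
  rw [List.perm_ext_iff_of_nodup hnd (PySem.Set.nodup_ofList xs)]
  intro k
  rw [hmem, PySem.Set.mem_ofList, List.Perm.mem_iff hperm]

theorem runLengths_pos (s : List Int) : ∀ v ∈ runLengths s, 1 ≤ v := by
  induction s using runLengths.induct with
  | case1 => simp [runLengths]
  | case2 x t ih =>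
    rw [runLengths]
    intro v hv
    rcases List.mem_cons.1 hv with rfl | h
    · omega
    · exact ih v h

theorem runLengths_ne_nil {s : List Int} (h : s ≠ []) : runLengths s ≠ [] := by
  cases s with
  | nil => simp at h
  | cons x t => simp [runLengths]

-- fold from the head equals fold from 0 over the whole list, when the head is nonneg
theorem foldl_head (v : Int) (t : List Int) (hv : 0 ≤ v) :
    t.foldl gstep v = (v :: t).foldl gstep 0 := by
  simp [List.foldl_cons, gstep_zero hv]

-- ===== VERDICT (by name: the statement is the Claim_ definition above) =====
theorem get_Z_spec : Claim_equal_get_Z := by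
  intro numbers _ hpre
  unfold Spec_get_Z get_Z get_Z_alt
  simp only [valuesA_eq]
  have hg : (fun (x v : Int) => (Int.gcd x v : Int)) = gstep := rfl
  -- B's values list is nonempty
  have hsne : PySem.List.sorted numbers (fun x => x) false ≠ [] := by
    intro h
    have := (PySem.List.sorted_perm numbers (fun x => x) false)
    rw [h] at this
    exact hpre this.symm.eq_nil
  cases hB : runLengths (PySem.List.sorted numbers (fun x => x) false) with
  | nil => exact absurd hB (runLengths_ne_nil hsne)
  | cons v rest =>
    -- A's values list is nonempty
    obtain ⟨m, tm, hpre'⟩ := List.exists_cons_of_ne_nil hpre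
    cases hL : (PySem.Set.ofList numbers).map (fun k => (numbers.count k : Int)) with
    | nil =>
      exfalso
      have hm : m ∈ PySem.Set.ofList numbers :=
        (PySem.Set.mem_ofList numbers m).2 (by rw [hpre']; exact List.mem_cons_self)
      rw [List.map_eq_nil_iff.1 hL] at hm
      exact absurd hm List.not_mem_nil
    | cons a ta =>
      have hget : PySem.List.pyGet? (a :: ta) (0 : Int) = some a := by
        simp [PySem.List.pyGet?, PySem.List.pyIdx?]
      have hslice : PySem.List.slice (a :: ta) (some 1) = ta := by
        rw [PySem.List.slice_from _ (by norm_num : (0:Int) ≤ 1)]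
        simp
      rw [hget, hslice, hg]
      -- head elements are nonnegative
      have haL : a ∈ (PySem.Set.ofList numbers).map (fun k => (numbers.count k : Int)) := by
        rw [hL]; exact List.mem_cons_self
      obtain ⟨k, _, hak⟩ := List.mem_map.1 haL
      have ha : 0 ≤ a := hak ▸ Int.natCast_nonneg _
      have hv : 0 ≤ v := le_trans (by norm_num)
        (runLengths_pos _ v (by rw [hB]; exact List.mem_cons_self))
      show ta.foldl gstep a = rest.foldl gstep v
      rw [foldl_head a ta ha, foldl_head v rest hv, ← hL, ← hB]
      exact (foldl_gstep_perm (values_perm numbers) 0).symm
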